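-- pv_equiv track=rewrite | github.com/keenfell/Tic-Tac-Toe | brain.py | enough_in_a_row
-- ===== SOURCE A (Python) =====
-- def enough_in_a_row(l: list[bool], threshold: int) -> bool:
--     """Checks the list of bools for a specificed amount in a row. Returns 'True' if the list equals the
--     threshold of 'True's in a row."""
--     score = 0
--
--     for v in l:
--         if v:
--             score += 1
--             if score >= threshold:
--                 return True
--         else:
--             score = 0
--
--     return False
-- ===== SOURCE B (Python) =====
-- def enough_in_a_row(l: list[bool], threshold: int) -> bool:
--     """Run-length grouping: build maximal runs of equal values, then check
--     whether some run of True values has length >= threshold."""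
--     runs = []  # list of (value, length), maximal consecutive runs in order
--     for v in l:
--         if runs and runs[-1][0] == v:
--             runs[-1] = (v, runs[-1][1] + 1)
--         else:
--             runs.append((v, 1))
--     return any(k and n >= threshold for k, n in runs)
-- ===== Notes on version B (the rewrite author's own statement) =====
-- stated objective: alternative
-- what changed: B first compresses the list into maximal runs of equal values ((value, length) pairs) and then checks whether any True run reaches the threshold, instead of threading a running counter that resets on False.
import Mathlib
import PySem

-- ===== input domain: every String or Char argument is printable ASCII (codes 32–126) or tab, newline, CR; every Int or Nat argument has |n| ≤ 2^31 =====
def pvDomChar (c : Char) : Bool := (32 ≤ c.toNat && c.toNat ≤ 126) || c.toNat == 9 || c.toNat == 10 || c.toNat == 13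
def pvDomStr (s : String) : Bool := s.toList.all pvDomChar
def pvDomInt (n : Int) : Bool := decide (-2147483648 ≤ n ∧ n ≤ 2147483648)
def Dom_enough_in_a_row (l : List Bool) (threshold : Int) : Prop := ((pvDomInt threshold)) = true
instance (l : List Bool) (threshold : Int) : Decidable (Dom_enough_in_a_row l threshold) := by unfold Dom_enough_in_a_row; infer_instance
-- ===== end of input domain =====

-- ===== PORT A =====
-- A: running counter over the list, reset on False, early return when it reaches threshold.
def goA (t : Int) : List Bool → Int → Bool
  | [], _ => false
  | v :: rest, score =>
    if v then
      (if t ≤ score + 1 then true else goA t rest (score + 1))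
    else goA t rest 0

def enough_in_a_row (l : List Bool) (threshold : Int) : Bool :=
  goA threshold l 0

-- ===== PORT B =====
-- B: compress the list into maximal runs (value, length) with a left fold that
-- updates the most recent run (kept at the head, reversed at the end, mirroring
-- Source B's runs[-1] update), then check any True run of length ≥ threshold.
def pGrp (t : Int) (g : Bool × Nat) : Bool := g.1 && decide (t ≤ (g.2 : Int))

def stepRun (runs : List (Bool × Nat)) (v : Bool) : List (Bool × Nat) :=
  match runs with
  | (k, n) :: gs => if k = v then (v, n + 1) :: gs else (v, 1) :: (k, n) :: gs
  | [] => [(v, 1)]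

def enough_in_a_row_alt (l : List Bool) (threshold : Int) : Bool :=
  ((l.foldl stepRun []).reverse).any (pGrp threshold)

-- ===== PRECONDITION & SPEC =====
def Spec_enough_in_a_row (l : List Bool) (threshold : Int) (out : Bool) : Prop := out = enough_in_a_row_alt l threshold
instance (l : List Bool) (threshold : Int) (out : Bool) : Decidable (Spec_enough_in_a_row l threshold out) := by unfold Spec_enough_in_a_row; infer_instance

-- ===== CLAIM (what is proved, stated in full; the proofs are below) =====
def Claim_equal_enough_in_a_row : Prop := ∀ (l : List Bool) (threshold : Int), Dom_enough_in_a_row l threshold → Spec_enough_in_a_row l threshold (enough_in_a_row l threshold)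

-- ===== LEMMAS AND PROOFS =====

-- once some accumulated run satisfies pGrp, folding more elements keeps that true
theorem any_foldl_mono (t : Int) :
    ∀ (l : List Bool) (acc : List (Bool × Nat)),
      (∃ g ∈ acc, pGrp t g = true) →
      ((l.foldl stepRun acc).reverse).any (pGrp t) = true := by
  intro l
  induction l with
  | nil =>
    intro acc ⟨g, hg, hp⟩
    simpa [List.any_reverse] using List.any_eq_true.2 ⟨g, hg, hp⟩
  | cons v rest ih =>
    intro acc h
    obtain ⟨g, hg, hp⟩ := h
    simp only [List.foldl_cons]
    apply ih
    match acc, hg with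
    | (k, n) :: gs, hg =>
      by_cases hkv : k = v
      · rcases List.mem_cons.1 hg with hEq | hMem
        · refine ⟨(v, n + 1), by simp [stepRun, hkv], ?_⟩
          subst hEq
          simp only [pGrp, Bool.and_eq_true, decide_eq_true_eq] at hp ⊢
          subst hkv
          exact ⟨hp.1, by push_cast; omega⟩
        · exact ⟨g, by simp [stepRun, hkv, hMem], hp⟩
      · refine ⟨g, ?_, hp⟩
        simp only [stepRun, if_neg hkv, List.mem_cons]
        exact Or.inr (List.mem_cons.1 hg)

-- the central invariant: running the counter from score n with pending failed runs acc
theorem goA_eq_foldl (t : Int) :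
    ∀ (l : List Bool) (n : Nat) (acc : List (Bool × Nat)),
      (n ≠ 0 → (n : Int) < t) →
      (∀ g ∈ acc, pGrp t g = false) →
      (n = 0 → acc = [] ∨ ∃ m gs, acc = (false, m) :: gs) →
      goA t l (n : Int) =
        ((l.foldl stepRun (if n = 0 then acc else (true, n) :: acc)).reverse).any (pGrp t) := by
  intro l
  induction l with
  | nil =>
    intro n acc hn hacc _
    simp only [List.foldl_nil, List.any_reverse, goA]
    symm
    rw [List.any_eq_false]
    intro g hg
    by_cases h0 : n = 0
    · simp only [h0] at hg
      simp [hacc g hg]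
    · simp only [if_neg h0] at hg
      rcases List.mem_cons.1 hg with hEq | hMem
      · subst hEq
        have := hn h0
        simp only [pGrp, Bool.and_eq_true, not_and, decide_eq_true_eq]
        intro _; omega
      · simp [hacc g hMem]
  | cons v rest ih =>
    intro n acc hn hacc hhead
    cases v with
    | true =>
      have hstep : stepRun (if n = 0 then acc else (true, n) :: acc) true
          = (true, n + 1) :: acc := by
        by_cases h0 : n = 0
        · rcases hhead h0 with hE | ⟨m, gs, hE⟩ <;>
            simp [h0, hE, stepRun]
        · simp [h0, stepRun]
      simp only [List.foldl_cons, hstep, goA]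
      by_cases ht : t ≤ (n : Int) + 1
      · rw [if_pos ht]
        symm
        apply any_foldl_mono
        refine ⟨(true, n + 1), List.mem_cons_self, ?_⟩
        simp only [pGrp]
        simp only [Bool.true_and, decide_eq_true_eq]
        push_cast; omega
      · rw [if_neg ht]
        have h1 : ((n : Int)) + 1 = ((n + 1 : Nat) : Int) := by push_cast; ring
        rw [h1, ih (n + 1) acc (by intro _; push_cast at ht ⊢; omega) hacc (by omega)]
        simp
    | false =>
      have hacc' : ∀ g ∈ stepRun (if n = 0 then acc else (true, n) :: acc) false,
          pGrp t g = false := by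
        by_cases h0 : n = 0
        · rcases hhead h0 with hE | ⟨m, gs, hE⟩
          · subst hE; simp [h0, stepRun, pGrp]
          · subst hE
            simp only [h0, stepRun]
            intro g hg
            rcases List.mem_cons.1 hg with hEq | hMem
            · subst hEq; simp [pGrp]
            · exact hacc g (List.mem_cons_of_mem _ hMem)
        · simp only [if_neg h0, stepRun, if_neg (by simp : ¬ (true = false))]
          intro g hg
          rcases List.mem_cons.1 hg with hEq | hMem
          · subst hEq; simp [pGrp]
          · rcases List.mem_cons.1 hMem with hEq | hMem'
            · subst hEq
              have := hn h0
              simp only [pGrp, Bool.and_eq_false_iff, decide_eq_false_iff_not]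
              right; omega
            · exact hacc g hMem'
      have hhead' : stepRun (if n = 0 then acc else (true, n) :: acc) false = [] ∨
          ∃ m gs, stepRun (if n = 0 then acc else (true, n) :: acc) false = (false, m) :: gs := by
        right
        by_cases h0 : n = 0
        · rcases hhead h0 with hE | ⟨m, gs, hE⟩ <;> subst hE <;> simp [h0, stepRun]
        · simp [h0, stepRun]
      simp only [List.foldl_cons, goA]
      have h0' : ((0 : Int)) = ((0 : Nat) : Int) := by norm_num
      rw [h0', ih 0 (stepRun (if n = 0 then acc else (true, n) :: acc) false)
        (by simp) hacc' (fun _ => hhead')]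
      simp

-- ===== VERDICT (by name: the statement is the Claim_ definition above) =====
theorem enough_in_a_row_spec : Claim_equal_enough_in_a_row := by
  intro l threshold _
  unfold Spec_enough_in_a_row enough_in_a_row enough_in_a_row_alt
  have := goA_eq_foldl threshold l 0 [] (by simp) (by simp) (by simp)
  simpa using this
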